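-- pv_equiv track=rewrite | github.com/tomerroditi/finance-analysis | fad/app/services/credentials_service.py | _cleanup_empty_entries
-- ===== SOURCE A (Python) =====
-- from copy import deepcopy
-- from typing import Dict
--
-- def _cleanup_empty_entries(credentials: Dict) -> Dict:
--     """
--     Remove empty accounts and providers from credentials.
--
--     Parameters
--     ----------
--     credentials : Dict
--         The credentials dictionary to clean up.
--
--     Returns
--     -------
--     Dict
--         The cleaned credentials dictionary.
--     """
--     # Create a copy to avoid modifying during iteration
--     cleaned_credentials = deepcopy(credentials)
--
--     # Remove empty accounts/providers
--     while True:
--         deleted = False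
--         for service, providers in cleaned_credentials.items():
--             if providers == {}:
--                 continue
--             for provider, accounts in list(providers.items()):
--                 if len(accounts) == 0:
--                     del cleaned_credentials[service][provider]
--                     deleted = True
--                     break
--                 for account, fields in list(accounts.items()):
--                     if len(fields) == 0:
--                         del cleaned_credentials[service][provider][account]
--                         deleted = True
--                         break
--         if not deleted:
--             break
--
--     return cleaned_credentials
-- ===== SOURCE B (Python) =====
-- def _cleanup_empty_entries(credentials):
--     """Single bottom-up pass: drop accounts with no fields, then drop
--     providers left with no accounts; services are always kept."""
--     result = {}
--     for service, providers in credentials.items():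
--         new_providers = {}
--         for provider, accounts in providers.items():
--             kept = {account: fields for account, fields in accounts.items() if fields}
--             if kept:
--                 new_providers[provider] = kept
--         result[service] = new_providers
--     return result
-- ===== Notes on version B (the rewrite author's own statement) =====
-- stated objective: faster
-- what changed: A repeatedly rescans the whole nested dict, deleting at most one empty account per provider (or one empty provider per service) per pass and restarting until a pass deletes nothing; B makes one bottom-up pass that keeps only accounts with nonempty fields and providers left with at least one account.
import Mathlib
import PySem

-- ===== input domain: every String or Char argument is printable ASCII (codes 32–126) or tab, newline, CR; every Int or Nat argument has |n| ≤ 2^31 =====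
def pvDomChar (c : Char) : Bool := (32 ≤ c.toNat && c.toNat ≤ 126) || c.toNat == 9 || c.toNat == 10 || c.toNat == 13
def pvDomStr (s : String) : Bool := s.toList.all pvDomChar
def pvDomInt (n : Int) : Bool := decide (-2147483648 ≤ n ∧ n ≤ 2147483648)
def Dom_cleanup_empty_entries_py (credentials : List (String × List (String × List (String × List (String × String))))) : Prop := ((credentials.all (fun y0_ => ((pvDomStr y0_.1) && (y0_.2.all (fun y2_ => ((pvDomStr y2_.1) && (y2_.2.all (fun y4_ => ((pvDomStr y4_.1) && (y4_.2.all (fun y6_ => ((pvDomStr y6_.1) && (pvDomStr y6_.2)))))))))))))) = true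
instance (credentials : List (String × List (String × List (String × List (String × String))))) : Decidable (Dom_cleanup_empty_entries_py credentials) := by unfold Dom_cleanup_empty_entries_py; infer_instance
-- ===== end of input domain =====

-- B replaces A's restart-on-delete fixpoint loop by a single bottom-up pass (prune empty accounts, then providers left empty); return values proved equal.



-- ===== PORT A =====
-- Fields of one account: a dict str -> str.
abbrev PVFields := List (String × String)
abbrev PVAccounts := List (String × PVFields)
abbrev PVProviders := List (String × PVAccounts)
abbrev PVCreds := List (String × PVProviders)

-- inner account loop of A: delete the FIRST account whose fields dict is empty, then break
def pvDelAccount : PVAccounts → PVAccounts × Bool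
  | [] => ([], false)
  | (a, f) :: rest =>
      if f = [] then (rest, true)
      else
        let r := pvDelAccount rest
        ((a, f) :: r.1, r.2)

-- provider loop of A over one service's providers (the 'providers == {}' continue is the [] case)
def pvPassProviders : PVProviders → PVProviders × Bool
  | [] => ([], false)
  | (p, accounts) :: rest =>
      if accounts = [] then (rest, true)   -- del provider, break out of the provider loop
      else
        let d := pvDelAccount accounts
        let r := pvPassProviders rest
        ((p, d.1) :: r.1, d.2 || r.2)

-- one full pass of A's for-loop over all services
def pvPass : PVCreds → PVCreds × Bool
  | [] => ([], false)
  | (s, provs) :: rest =>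
      let d := pvPassProviders provs
      let r := pvPass rest
      ((s, d.1) :: r.1, d.2 || r.2)

-- size measure used only to justify termination of A's 'while True' loop
def pvSzAccs (accs : PVAccounts) : Nat := accs.length
def pvSzProvs (provs : PVProviders) : Nat :=
  provs.foldr (fun pa n => 1 + pvSzAccs pa.2 + n) 0
def pvSz (cred : PVCreds) : Nat :=
  cred.foldr (fun sp n => pvSzProvs sp.2 + n) 0

theorem pvDelAccount_sz (accs : PVAccounts) :
    (pvDelAccount accs).1.length + ((pvDelAccount accs).2.toNat) = accs.length := by
  induction accs with
  | nil => simp [pvDelAccount]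
  | cons hd tl ih =>
    obtain ⟨a, f⟩ := hd
    by_cases hf : f = [] <;> simp [pvDelAccount, hf] <;> cases h2 : (pvDelAccount tl).2 <;>
      simp [h2] at ih ⊢ <;> omega

theorem pvPassProviders_sz (provs : PVProviders) :
    pvSzProvs (pvPassProviders provs).1 + ((pvPassProviders provs).2.toNat) ≤ pvSzProvs provs ∧
    ((pvPassProviders provs).2 = true → pvSzProvs (pvPassProviders provs).1 < pvSzProvs provs) := by
  induction provs with
  | nil => simp [pvPassProviders, pvSzProvs]
  | cons hd tl ih =>
    obtain ⟨p, accounts⟩ := hd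
    by_cases ha : accounts = []
    · simp [pvPassProviders, ha, pvSzProvs, pvSzAccs]
    · have hacc := pvDelAccount_sz accounts
      simp only [pvPassProviders, ha, if_false]
      cases hd2 : (pvDelAccount accounts).2 <;> cases hr2 : (pvPassProviders tl).2 <;>
        simp [hd2, hr2, pvSzProvs, pvSzAccs] at hacc ih ⊢ <;> omega

theorem pvPass_sz (cred : PVCreds) :
    ((pvPass cred).2 = true → pvSz (pvPass cred).1 < pvSz cred) ∧
    pvSz (pvPass cred).1 ≤ pvSz cred := by
  induction cred with
  | nil => simp [pvPass, pvSz]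
  | cons hd tl ih =>
    obtain ⟨s, provs⟩ := hd
    have hp := pvPassProviders_sz provs
    cases hd2 : (pvPassProviders provs).2 <;> cases hr2 : (pvPass tl).2 <;>
      simp [pvPass, hd2, hr2, pvSz] at hp ih ⊢ <;> omega

-- A's 'while True: ... if not deleted: break' loop
def pvLoop (cred : PVCreds) : PVCreds :=
  match h : pvPass cred with
  | (c', true) => pvLoop c'
  | (c', false) => c'
termination_by pvSz cred
decreasing_by
  have := (pvPass_sz cred).1
  rw [h] at this; exact this rfl

-- port of A (deepcopy is the identity on values)
def cleanup_empty_entries_py (credentials : List (String × List (String × List (String × List (String × String))))) : List (String × List (String × List (String × List (String × String)))) :=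
  pvLoop credentials

-- ===== PORT B =====
-- port of B: one bottom-up pass; keep accounts with nonempty fields, drop providers left empty
def cleanup_empty_entries_py_alt (credentials : List (String × List (String × List (String × List (String × String))))) : List (String × List (String × List (String × List (String × String)))) :=
  credentials.map (fun sp =>
    (sp.1, sp.2.filterMap (fun pa =>
      let kept := pa.2.filter (fun af => !decide (af.2 = []))
      if kept = [] then none else some (pa.1, kept))))

-- ===== PRECONDITION & SPEC =====
def Spec_cleanup_empty_entries_py (credentials : List (String × List (String × List (String × List (String × String))))) (out : List (String × List (String × List (String × List (String × String))))) : Prop := out = cleanup_empty_entries_py_alt credentials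
instance (credentials : List (String × List (String × List (String × List (String × String))))) (out : List (String × List (String × List (String × List (String × String))))) : Decidable (Spec_cleanup_empty_entries_py credentials out) := by
  unfold Spec_cleanup_empty_entries_py
  letI d2 : DecidableEq (List (String × List (String × List (String × String)))) := instDecidableEqList
  letI d3 : DecidableEq (List (String × List (String × List (String × List (String × String))))) := instDecidableEqList
  exact d3 _ _

-- ===== CLAIM (what is proved, stated in full; the proofs are below) =====
def Claim_equal_cleanup_empty_entries_py : Prop := ∀ (credentials : List (String × List (String × List (String × List (String × String))))), Dom_cleanup_empty_entries_py credentials → Spec_cleanup_empty_entries_py credentials (cleanup_empty_entries_py credentials)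

-- ===== LEMMAS AND PROOFS =====

-- the cleaned value of one providers dict, as B computes it
def pvAltProvs (provs : PVProviders) : PVProviders :=
  provs.filterMap (fun pa =>
    let kept := pa.2.filter (fun af => !decide (af.2 = []))
    if kept = [] then none else some (pa.1, kept))

theorem alt_eq_map (cred : PVCreds) :
    cleanup_empty_entries_py_alt cred = cred.map (fun sp => (sp.1, pvAltProvs sp.2)) := rfl

theorem filter_delAccount (accs : PVAccounts) :
    (pvDelAccount accs).1.filter (fun af => !decide (af.2 = [])) =
    accs.filter (fun af => !decide (af.2 = [])) := by
  induction accs with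
  | nil => simp [pvDelAccount]
  | cons hd tl ih =>
    obtain ⟨a, f⟩ := hd
    by_cases hf : f = [] <;> simp [pvDelAccount, hf, List.filter, ih]

theorem altProvs_pass (provs : PVProviders) :
    pvAltProvs (pvPassProviders provs).1 = pvAltProvs provs := by
  induction provs with
  | nil => simp [pvPassProviders]
  | cons hd tl ih =>
    obtain ⟨p, accounts⟩ := hd
    by_cases ha : accounts = []
    · subst ha
      simp only [pvPassProviders, if_pos rfl]
      simp [pvAltProvs, List.filterMap_cons, List.filter]
    · simp only [pvPassProviders, ha, if_false]
      simp only [pvAltProvs, List.filterMap_cons] at ih ⊢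
      rw [filter_delAccount accounts, ih]

-- B's value is invariant under one pass of A
theorem alt_pass (cred : PVCreds) :
    cleanup_empty_entries_py_alt (pvPass cred).1 = cleanup_empty_entries_py_alt cred := by
  induction cred with
  | nil => simp [pvPass]
  | cons hd tl ih =>
    obtain ⟨s, provs⟩ := hd
    simp only [pvPass, alt_eq_map, List.map_cons] at ih ⊢
    rw [altProvs_pass provs]
    exact congrArg _ ih

theorem delAccount_false (accs : PVAccounts) (h : (pvDelAccount accs).2 = false) :
    (pvDelAccount accs).1 = accs ∧ accs.filter (fun af => !decide (af.2 = [])) = accs := by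
  induction accs with
  | nil => simp [pvDelAccount]
  | cons hd tl ih =>
    obtain ⟨a, f⟩ := hd
    by_cases hf : f = []
    · simp [pvDelAccount, hf] at h
    · have h' : (pvDelAccount tl).2 = false := by simpa [pvDelAccount, hf] using h
      obtain ⟨h1, h2⟩ := ih h'
      refine ⟨by simp [pvDelAccount, hf, h1], ?_⟩
      have hc : (!decide (((a, f) : String × PVFields).2 = [])) = true := by simp [hf]
      rw [List.filter_cons, if_pos hc, h2]

theorem passProviders_false (provs : PVProviders) (h : (pvPassProviders provs).2 = false) :
    (pvPassProviders provs).1 = provs ∧ pvAltProvs provs = provs := by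
  induction provs with
  | nil => simp [pvPassProviders, pvAltProvs]
  | cons hd tl ih =>
    obtain ⟨p, accounts⟩ := hd
    by_cases ha : accounts = []
    · simp [pvPassProviders, ha] at h
    · simp only [pvPassProviders, ha, if_false] at h
      have h1 : (pvDelAccount accounts).2 = false := by
        cases h2 : (pvDelAccount accounts).2 <;> simp [h2] at h ⊢
      have h3 : (pvPassProviders tl).2 = false := by
        cases h2 : (pvPassProviders tl).2 <;> simp [h2, h1] at h ⊢
      obtain ⟨hd1, hd2⟩ := delAccount_false accounts h1
      obtain ⟨ht1, ht2⟩ := ih h3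
      constructor
      · simp only [pvPassProviders, ha, if_false]
        rw [hd1, ht1]
      · simp only [pvAltProvs, List.filterMap_cons] at ht2 ⊢
        rw [hd2, if_neg ha, ht2]

-- a pass with no deletion leaves the input unchanged and equal to B's value
theorem pass_false (cred : PVCreds) (h : (pvPass cred).2 = false) :
    (pvPass cred).1 = cred ∧ cleanup_empty_entries_py_alt cred = cred := by
  induction cred with
  | nil => simp [pvPass, cleanup_empty_entries_py_alt]
  | cons hd tl ih =>
    obtain ⟨s, provs⟩ := hd
    simp only [pvPass] at h
    have h1 : (pvPassProviders provs).2 = false := by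
      cases h2 : (pvPassProviders provs).2 <;> simp [h2] at h ⊢
    have h3 : (pvPass tl).2 = false := by
      cases h2 : (pvPass tl).2 <;> simp [h2, h1] at h ⊢
    obtain ⟨hp1, hp2⟩ := passProviders_false provs h1
    obtain ⟨ht1, ht2⟩ := ih h3
    constructor
    · simp only [pvPass]
      rw [hp1, ht1]
    · simp only [alt_eq_map, List.map_cons] at ht2 ⊢
      rw [hp2]
      exact congrArg _ ht2

theorem loop_eq_alt (cred : PVCreds) : pvLoop cred = cleanup_empty_entries_py_alt cred := by
  rw [pvLoop]
  split
  · next c' h =>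
    have hsz : pvSz c' < pvSz cred := by
      have := (pvPass_sz cred).1; rw [h] at this; exact this rfl
    rw [loop_eq_alt c']
    have := alt_pass cred; rw [h] at this; exact this
  · next c' h =>
    have hpf := pass_false cred (by rw [h])
    rw [h] at hpf
    have h1 : c' = cred := hpf.1
    rw [h1]
    exact hpf.2.symm
termination_by pvSz cred

-- ===== VERDICT (by name: the statement is the Claim_ definition above) =====
theorem cleanup_empty_entries_py_spec : Claim_equal_cleanup_empty_entries_py := by
  intro credentials _
  unfold Spec_cleanup_empty_entries_py cleanup_empty_entries_py
  exact loop_eq_alt credentials
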